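-- pv_equiv track=rewrite | github.com/s-nosonov-chernomor/andromeda_SMART | app/services/fast_modbus_observer.py | _build_blocks_from_subscription_map
-- ===== SOURCE A (Python) =====
-- from typing import Any, List, Dict, Optional, Tuple
--
-- PRIORITY_HIGH = 2
--
-- def _build_blocks_from_subscription_map(per_type: Dict[str, List[int]]) -> List[Tuple[str, int, List[int]]]:
--     blocks: List[Tuple[str, int, List[int]]] = []
--
--     for rtype in ("coil", "discrete", "holding"):
--         addrs = sorted(set(int(a) for a in (per_type.get(rtype) or [])))
--         if not addrs:
--             continue
--
--         start = addrs[0]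
--         prev = start
--         settings = [PRIORITY_HIGH]
--
--         for a in addrs[1:]:
--             if a == prev + 1:
--                 settings.append(PRIORITY_HIGH)
--                 prev = a
--             else:
--                 blocks.append((rtype, start, settings))
--                 start = prev = a
--                 settings = [PRIORITY_HIGH]
--
--         blocks.append((rtype, start, settings))
--
--     return blocks
-- ===== SOURCE B (Python) =====
-- from typing import Any, List, Dict, Optional, Tuple
--
-- PRIORITY_HIGH = 2
--
-- def _build_blocks_from_subscription_map(per_type: Dict[str, List[int]]) -> List[Tuple[str, int, List[int]]]:
--     # Different decomposition: instead of A's start/prev/settings state machine,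
--     # repeatedly split off the longest consecutive run and emit it as one block.
--     blocks: List[Tuple[str, int, List[int]]] = []
--     for rtype in ("coil", "discrete", "holding"):
--         addrs = sorted(set(int(a) for a in (per_type.get(rtype) or [])))
--         while addrs:
--             k = 1
--             while k < len(addrs) and addrs[k] == addrs[k - 1] + 1:
--                 k += 1
--             blocks.append((rtype, addrs[0], [PRIORITY_HIGH] * k))
--             addrs = addrs[k:]
--     return blocks
-- ===== Notes on version B (the rewrite author's own statement) =====
-- stated objective: simpler
-- what changed: Replaces A's start/prev/settings accumulator state machine with a run-splitting decomposition: repeatedly peel off the longest consecutive run of the sorted deduplicated addresses and emit it as one block.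
import Mathlib
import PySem

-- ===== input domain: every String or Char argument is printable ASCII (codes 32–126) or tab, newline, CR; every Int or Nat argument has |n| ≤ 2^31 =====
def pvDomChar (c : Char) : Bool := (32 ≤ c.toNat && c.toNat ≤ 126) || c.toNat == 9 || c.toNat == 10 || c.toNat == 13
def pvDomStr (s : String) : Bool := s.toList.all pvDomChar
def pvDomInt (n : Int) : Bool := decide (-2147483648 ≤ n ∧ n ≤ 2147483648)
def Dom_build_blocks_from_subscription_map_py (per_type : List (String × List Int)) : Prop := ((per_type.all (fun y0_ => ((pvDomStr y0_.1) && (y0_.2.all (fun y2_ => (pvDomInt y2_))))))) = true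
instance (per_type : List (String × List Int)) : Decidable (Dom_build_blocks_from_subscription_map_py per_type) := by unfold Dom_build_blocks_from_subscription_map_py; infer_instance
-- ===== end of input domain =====

-- B replaces A's start/prev/settings accumulator state machine by repeatedly
-- splitting off the longest consecutive run (objective: simpler decomposition).

-- ===== PORT A =====
-- per_type.get(rtype) or []  (dict → assoc list, first-match lookup)
def pvLookup (per_type : List (String × List Int)) (rtype : String) : List Int :=
  (per_type.lookup rtype).getD []

-- sorted(set(int(a) for a in xs))  (int(a) is the identity on ints)
def pvAddrs (per_type : List (String × List Int)) (rtype : String) : List Int :=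
  PySem.List.sorted (PySem.Set.ofList (pvLookup per_type rtype)) (fun x => x) false

-- A's inner-loop body
def pvStepA (rtype : String)
    (st : List (String × Int × List Int) × Int × Int × List Int) (a : Int) :
    List (String × Int × List Int) × Int × Int × List Int :=
  let (bl, start, prev, settings) := st
  if a = prev + 1 then (bl, start, a, settings ++ [2])
  else (bl ++ [(rtype, start, settings)], a, a, [2])

-- the body of A's outer loop for one rtype: the start/prev/settings state machine
def pvProcA (rtype : String) (blocks : List (String × Int × List Int)) (addrs : List Int) :
    List (String × Int × List Int) :=
  match addrs with
  | [] => blocks                          -- 'if not addrs: continue'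
  | a0 :: rest =>
      let st := rest.foldl (pvStepA rtype) (blocks, a0, a0, [2])
      st.1 ++ [(rtype, st.2.1, st.2.2.2)]

def build_blocks_from_subscription_map_py (per_type : List (String × List Int)) :
    List (String × Int × List Int) :=
  ["coil", "discrete", "holding"].foldl
    (fun blocks rtype => pvProcA rtype blocks (pvAddrs per_type rtype)) []

-- ===== PORT B =====
-- the inner 'while k < len(addrs) and addrs[k] == addrs[k-1] + 1: k += 1':
-- counts how many further elements continue the run, and returns the remainder
def pvTakeRun (prev : Int) : List Int → Nat × List Int
  | [] => (0, [])
  | a :: rest =>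
      if a = prev + 1 then
        let p := pvTakeRun a rest
        (p.1 + 1, p.2)
      else (0, a :: rest)

theorem pvTakeRun_rest_length_le (prev : Int) (xs : List Int) :
    (pvTakeRun prev xs).2.length ≤ xs.length := by
  induction xs generalizing prev with
  | nil => simp [pvTakeRun]
  | cons a rest ih =>
      simp only [pvTakeRun]
      split
      · exact le_trans (ih a) (Nat.le_succ _)
      · simp

-- the outer 'while addrs:' loop: emit one block per run
def pvRunsB (rtype : String) (addrs : List Int) : List (String × Int × List Int) :=
  match addrs with
  | [] => []
  | a :: rest =>
      let p := pvTakeRun a rest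
      (rtype, a, List.replicate (p.1 + 1) 2) :: pvRunsB rtype p.2
termination_by addrs.length
decreasing_by
  simpa using Nat.lt_succ_of_le (pvTakeRun_rest_length_le a rest)

def build_blocks_from_subscription_map_py_alt (per_type : List (String × List Int)) :
    List (String × Int × List Int) :=
  ["coil", "discrete", "holding"].foldl
    (fun blocks rtype => blocks ++ pvRunsB rtype (pvAddrs per_type rtype)) []

-- ===== PRECONDITION & SPEC =====
def Spec_build_blocks_from_subscription_map_py (per_type : List (String × List Int)) (out : List (String × Int × List Int)) : Prop := out = build_blocks_from_subscription_map_py_alt per_type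
instance (per_type : List (String × List Int)) (out : List (String × Int × List Int)) : Decidable (Spec_build_blocks_from_subscription_map_py per_type out) := by unfold Spec_build_blocks_from_subscription_map_py; infer_instance

-- ===== CLAIM (what is proved, stated in full; the proofs are below) =====
def Claim_equal_build_blocks_from_subscription_map_py : Prop := ∀ (per_type : List (String × List Int)), Dom_build_blocks_from_subscription_map_py per_type → Spec_build_blocks_from_subscription_map_py per_type (build_blocks_from_subscription_map_py per_type)

-- ===== LEMMAS AND PROOFS =====

-- invariant of A's inner fold: with settings = replicate (k+1) 2 accumulated so far,
-- finishing the fold appends the current run (extended by pvTakeRun) and then B's runs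
theorem pvLoopA (rtype : String) (rest : List Int) :
    ∀ (bl : List (String × Int × List Int)) (start prev : Int) (k : Nat),
    (let st := rest.foldl (pvStepA rtype) (bl, start, prev, List.replicate (k + 1) 2)
     st.1 ++ [(rtype, st.2.1, st.2.2.2)])
    = bl ++ (rtype, start, List.replicate (k + 1 + (pvTakeRun prev rest).1) 2)
          :: pvRunsB rtype (pvTakeRun prev rest).2 := by
  induction rest with
  | nil => intro bl start prev k; simp [pvTakeRun, pvRunsB]
  | cons a rest ih =>
      intro bl start prev k
      by_cases h : a = prev + 1
      · have h1 : List.replicate (k + 1) (2 : Int) ++ [2] = List.replicate (k + 1 + 1) 2 := by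
          simp [List.replicate_succ']
        have := ih bl start a (k + 1)
        simp only [List.foldl_cons, pvStepA, if_pos h, h1, this, pvTakeRun]
        ring_nf
      · have := ih (bl ++ [(rtype, start, List.replicate (k + 1) 2)]) a a 0
        simp only [List.foldl_cons, pvStepA, if_neg h]
        rw [show [(2 : Int)] = List.replicate (0 + 1) 2 from by simp, this]
        simp only [pvTakeRun, if_neg h]
        rw [pvRunsB]
        have h3 : (pvTakeRun a rest).1 + 1 = 0 + 1 + (pvTakeRun a rest).1 := by omega
        simp [← h3]

-- per-type step: A's state machine equals appending B's runs
theorem pvProcA_eq (rtype : String) (blocks : List (String × Int × List Int))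
    (addrs : List Int) :
    pvProcA rtype blocks addrs = blocks ++ pvRunsB rtype addrs := by
  cases addrs with
  | nil => simp [pvProcA, pvRunsB]
  | cons a0 rest =>
      have := pvLoopA rtype rest blocks a0 a0 0
      simp only [pvProcA, List.replicate] at this ⊢
      rw [this, pvRunsB]
      ring_nf

-- ===== VERDICT (by name: the statement is the Claim_ definition above) =====
theorem build_blocks_from_subscription_map_py_spec : Claim_equal_build_blocks_from_subscription_map_py := by
  intro per_type _
  unfold Spec_build_blocks_from_subscription_map_py
  unfold build_blocks_from_subscription_map_py build_blocks_from_subscription_map_py_alt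
  simp only [List.foldl_cons, List.foldl_nil, pvProcA_eq]
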